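-- pv_equiv track=rewrite | github.com/joemarchionna/kissom | kissom/utils/names.py | normalizeStoreNameToObj
-- ===== SOURCE A (Python) =====
-- def normalizeStoreNameToObj(name: str, removeChars: list = ["_", "-"], toLower: bool = False):
--     _nn = ""
--     capNext = False
--     for c in name:
--         if c in removeChars:
--             capNext = True
--         else:
--             if capNext:
--                 _nn += c.upper()
--                 capNext = False
--             else:
--                 _nn += c
--     return _nn
-- ===== SOURCE B (Python) =====
-- def normalizeStoreNameToObj(name: str, removeChars: list = ["_", "-"], toLower: bool = False):
--     # Pass 1: segment name into words at separator chars (empty words for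
--     # leading/consecutive/trailing separators).
--     words = []
--     cur = ""
--     for c in name:
--         if c in removeChars:
--             words.append(cur)
--             cur = ""
--         else:
--             cur += c
--     words.append(cur)
--     # Pass 2: first word verbatim, every later word with its first char uppercased.
--     return words[0] + "".join(w[:1].upper() + w[1:] for w in words[1:])
-- ===== Notes on version B (the rewrite author's own statement) =====
-- stated objective: idiomatic
-- what changed: Replaced A's single pass with a capNext flag by a two-phase decomposition: segment the name into words at separator chars, then emit words[0] plus each later word with only its first char uppercased, joined.
import Mathlib
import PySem

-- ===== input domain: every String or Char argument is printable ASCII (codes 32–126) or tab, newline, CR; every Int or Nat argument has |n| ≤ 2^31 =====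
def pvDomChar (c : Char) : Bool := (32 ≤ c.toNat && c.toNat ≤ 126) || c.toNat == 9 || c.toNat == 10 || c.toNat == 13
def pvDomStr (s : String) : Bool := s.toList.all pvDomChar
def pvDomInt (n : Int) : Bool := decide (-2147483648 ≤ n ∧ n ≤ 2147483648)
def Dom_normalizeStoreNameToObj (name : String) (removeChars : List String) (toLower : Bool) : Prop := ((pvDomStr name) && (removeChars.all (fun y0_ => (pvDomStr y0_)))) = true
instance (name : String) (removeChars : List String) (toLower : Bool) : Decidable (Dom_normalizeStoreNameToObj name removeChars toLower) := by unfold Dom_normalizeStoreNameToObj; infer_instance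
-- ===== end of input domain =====

-- B replaces A's single pass with a capNext flag by a two-phase decomposition:
-- segment the name into words at separator chars, then capitalize-and-join (idiomatic; same cost).
-- toLower is unused, exactly as in the Python sources.

-- ===== PORT A =====
-- A's loop state: (_nn, capNext); 'c in removeChars' compares the one-char string to each entry.
def normalizeStoreNameToObj (name : String) (removeChars : List String) (toLower : Bool) : String :=
  let st := name.toList.foldl
    (fun (st : List Char × Bool) c =>
      if removeChars.contains (String.mk [c]) then (st.1, true)
      else if st.2 then (st.1 ++ PySem.Chars.upper [c], false)
      else (st.1 ++ [c], false))
    ([], false)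
  String.mk st.1

-- ===== PORT B =====
-- w[:1].upper() + w[1:]: the slices have literal nonneg bounds, so they are take 1 / drop 1
-- (PySem.List.slice_to_natCast / slice_from_natCast).
def pvCap (w : List Char) : List Char := PySem.Chars.upper (w.take 1) ++ w.drop 1

def normalizeStoreNameToObj_alt (name : String) (removeChars : List String) (toLower : Bool) : String :=
  -- pass 1: (finished words, current word)
  let st := name.toList.foldl
    (fun (st : List (List Char) × List Char) c =>
      if removeChars.contains (String.mk [c]) then (st.1 ++ [st.2], [])
      else (st.1, st.2 ++ [c]))
    ([], [])
  let words := st.1 ++ [st.2]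
  -- pass 2: words[0] + "".join(cap w for w in words[1:]); words is nonempty so words[0] is headD
  String.mk (words.headD [] ++ ((words.tail).map pvCap).flatten)

-- ===== PRECONDITION & SPEC =====
def Spec_normalizeStoreNameToObj (name : String) (removeChars : List String) (toLower : Bool) (out : String) : Prop := out = normalizeStoreNameToObj_alt name removeChars toLower
instance (name : String) (removeChars : List String) (toLower : Bool) (out : String) : Decidable (Spec_normalizeStoreNameToObj name removeChars toLower out) := by unfold Spec_normalizeStoreNameToObj; infer_instance

-- ===== CLAIM (what is proved, stated in full; the proofs are below) =====
def Claim_equal_normalizeStoreNameToObj : Prop := ∀ (name : String) (removeChars : List String) (toLower : Bool), Dom_normalizeStoreNameToObj name removeChars toLower → Spec_normalizeStoreNameToObj name removeChars toLower (normalizeStoreNameToObj name removeChars toLower)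

-- ===== LEMMAS AND PROOFS =====

-- relation between A's state (nn, capNext) and B's state (ws, cur)
def pvInv (nn : List Char) (b : Bool) (ws : List (List Char)) (cur : List Char) : Prop :=
  match ws with
  | [] => nn = cur ∧ b = false
  | w0 :: rest => nn = w0 ++ (rest.map pvCap).flatten ++ pvCap cur ∧ b = cur.isEmpty

theorem pvCap_nil : pvCap [] = [] := rfl

theorem pv_key (cs : List Char) (rc : List String) :
    ∀ (nn : List Char) (b : Bool) (ws : List (List Char)) (cur : List Char),
      pvInv nn b ws cur →
      (cs.foldl
        (fun (st : List Char × Bool) c =>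
          if rc.contains (String.mk [c]) then (st.1, true)
          else if st.2 then (st.1 ++ PySem.Chars.upper [c], false)
          else (st.1 ++ [c], false))
        (nn, b)).1
      =
      (let st := cs.foldl
          (fun (st : List (List Char) × List Char) c =>
            if rc.contains (String.mk [c]) then (st.1 ++ [st.2], [])
            else (st.1, st.2 ++ [c]))
          (ws, cur)
       let words := st.1 ++ [st.2]
       words.headD [] ++ ((words.tail).map pvCap).flatten) := by
  induction cs with
  | nil =>
    intro nn b ws cur hInv
    cases ws with
    | nil => simp [pvInv] at hInv; simp [hInv.1]
    | cons w0 rest => simp [pvInv] at hInv; simp [hInv.1]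
  | cons c cs ih =>
    intro nn b ws cur hInv
    by_cases hsep : rc.contains (String.mk [c]) = true
    · simp only [List.foldl_cons, hsep, if_pos]
      apply ih
      cases ws with
      | nil =>
        simp [pvInv] at hInv
        simp [pvInv, hInv.1, pvCap_nil]
      | cons w0 rest =>
        simp [pvInv] at hInv
        simp [pvInv, hInv.1, pvCap_nil]
    · cases ws with
      | nil =>
        simp [pvInv] at hInv
        obtain ⟨h1, h2⟩ := hInv
        simp only [List.foldl_cons, hsep, if_false, Bool.false_eq_true, h2]
        apply ih
        simp [pvInv, h1]
      | cons w0 rest =>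
        simp [pvInv] at hInv
        obtain ⟨h1, h2⟩ := hInv
        cases cur with
        | nil =>
          simp at h2
          simp only [List.foldl_cons, hsep, h2, if_pos]
          apply ih
          simp [pvInv, h1, pvCap, PySem.Chars.upper]
        | cons d ds =>
          simp at h2
          simp only [List.foldl_cons, hsep, h2, Bool.false_eq_true]
          apply ih
          simp [pvInv, h1, pvCap]

-- ===== VERDICT (by name: the statement is the Claim_ definition above) =====
theorem normalizeStoreNameToObj_spec : Claim_equal_normalizeStoreNameToObj := by
  intro name removeChars toLower _
  show _ = _
  unfold normalizeStoreNameToObj normalizeStoreNameToObj_alt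
  simp only []
  exact congrArg String.mk (pv_key name.toList removeChars [] false [] [] (by simp [pvInv]))
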